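-- pv_equiv track=rewrite | github.com/finlaymcnally/RecipeImporter | cookimport/staging/recipe_ownership.py | _normalize_index_list
-- ===== SOURCE A (Python) =====
-- from typing import Any, Mapping, Sequence
--
-- class RecipeOwnershipInvariantError(ValueError):
--     """Raised when recipe/nonrecipe ownership invariants are violated."""
--
-- def _normalize_index_list(raw_indices: Sequence[Any]) -> list[int]:
--     normalized: list[int] = []
--     seen: set[int] = set()
--     for raw_value in raw_indices:
--         try:
--             value = int(raw_value)
--         except (TypeError, ValueError) as exc:
--             raise RecipeOwnershipInvariantError(
--                 f"Recipe ownership block indices must be integers; got {raw_value!r}."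
--             ) from exc
--         if value not in seen:
--             seen.add(value)
--             normalized.append(value)
--     return sorted(normalized)
-- ===== SOURCE B (Python) =====
-- from typing import Any, Sequence
--
-- class RecipeOwnershipInvariantError(ValueError):
--     """Raised when recipe/nonrecipe ownership invariants are violated."""
--
-- def _normalize_index_list(raw_indices: Sequence[Any]) -> list[int]:
--     converted: list[int] = []
--     for raw_value in raw_indices:
--         try:
--             converted.append(int(raw_value))
--         except (TypeError, ValueError) as exc:
--             raise RecipeOwnershipInvariantError(
--                 f"Recipe ownership block indices must be integers; got {raw_value!r}."
--             ) from exc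
--     converted.sort()
--     result: list[int] = []
--     for value in converted:
--         if not result or result[-1] != value:
--             result.append(value)
--     return result
-- ===== Notes on version B (the rewrite author's own statement) =====
-- stated objective: alternative
-- what changed: Replaces the during-traversal hash-set dedup (append-if-unseen, then sort) with convert-all, sort, then a single adjacent-duplicate-removal scan over the sorted list.
import Mathlib
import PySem

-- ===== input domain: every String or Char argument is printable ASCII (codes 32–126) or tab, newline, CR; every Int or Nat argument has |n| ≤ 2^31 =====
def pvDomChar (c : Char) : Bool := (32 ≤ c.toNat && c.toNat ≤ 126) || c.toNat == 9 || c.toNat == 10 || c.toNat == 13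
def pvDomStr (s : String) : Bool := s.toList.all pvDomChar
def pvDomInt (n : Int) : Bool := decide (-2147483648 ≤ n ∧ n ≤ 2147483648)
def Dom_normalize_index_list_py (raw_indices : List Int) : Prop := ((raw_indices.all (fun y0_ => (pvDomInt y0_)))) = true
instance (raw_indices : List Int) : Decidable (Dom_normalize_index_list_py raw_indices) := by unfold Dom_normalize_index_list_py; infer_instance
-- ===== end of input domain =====

-- B replaces A's during-traversal seen-set dedup with convert-all, sort, then one
-- adjacent-duplicate-removal scan (objective: alternative; same asymptotic cost).
-- On List Int inputs int() never raises, so both ports are total.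

-- ===== PORT A =====
-- literal port of A: loop appending to `normalized` when the value is not in `seen`,
-- then sorted(normalized)
def normalize_index_list_py (raw_indices : List Int) : List Int :=
  let st := raw_indices.foldl
    (fun (st : List Int × PySem.Set Int) value =>
      if st.2.contains value then st else (st.1 ++ [value], st.2.add value))
    ([], PySem.Set.empty)
  PySem.List.sorted st.1 (fun x => x) false

-- ===== PORT B =====
-- literal port of Source B: convert-all loop, sort, adjacent-dedup scan
-- (`if not result or result[-1] != value` ↔ result.getLast? ≠ some value)
def normalize_index_list_py_alt (raw_indices : List Int) : List Int :=
  let converted := raw_indices.foldl (fun acc value => acc ++ [value]) ([] : List Int)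
  let sortedList := PySem.List.sorted converted (fun x => x) false
  sortedList.foldl
    (fun res value => if res.getLast? = some value then res else res ++ [value]) []

-- ===== PRECONDITION & SPEC =====
def Spec_normalize_index_list_py (raw_indices : List Int) (out : List Int) : Prop := out = normalize_index_list_py_alt raw_indices
instance (raw_indices : List Int) (out : List Int) : Decidable (Spec_normalize_index_list_py raw_indices out) := by unfold Spec_normalize_index_list_py; infer_instance

-- ===== CLAIM (what is proved, stated in full; the proofs are below) =====
def Claim_equal_normalize_index_list_py : Prop := ∀ (raw_indices : List Int), Dom_normalize_index_list_py raw_indices → Spec_normalize_index_list_py raw_indices (normalize_index_list_py raw_indices)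

-- ===== LEMMAS AND PROOFS =====

-- A's loop keeps `normalized` equal (as a list) to `seen`, which is set(raw).
theorem pvA_fold_eq (l : List Int) (s : PySem.Set Int) :
    l.foldl (fun (st : List Int × PySem.Set Int) value =>
      if st.2.contains value then st else (st.1 ++ [value], st.2.add value)) (s, s)
      = (l.foldl PySem.Set.add s, l.foldl PySem.Set.add s) := by
  induction l generalizing s with
  | nil => rfl
  | cons v t ih =>
    simp only [List.foldl_cons]
    by_cases h : v ∈ s
    · have hc : PySem.Set.contains s v = true := (PySem.Set.contains_iff s v).mpr h
      rw [if_pos hc, PySem.Set.add_of_mem h]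
      exact ih s
    · have hc : PySem.Set.contains s v = false := by
        cases hcv : PySem.Set.contains s v with
        | false => rfl
        | true => exact absurd ((PySem.Set.contains_iff s v).mp hcv) h
      rw [if_neg (by simp; exact h), PySem.Set.add_of_not_mem h]
      exact ih (s ++ [v])

theorem pvFoldl_append (l acc : List Int) :
    l.foldl (fun a v => a ++ [v]) acc = acc ++ l := by
  induction l generalizing acc with
  | nil => simp
  | cons v t ih => simp [List.foldl_cons, ih]

theorem pvLe_getLast_of_pairwise_lt (l : List Int) (a lst : Int)
    (hp : l.Pairwise (· < ·)) (ha : a ∈ l) (hl : l.getLast? = some lst) : a ≤ lst := by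
  induction l with
  | nil => cases ha
  | cons h t ih =>
    cases t with
    | nil =>
      simp at hl ha; omega
    | cons h2 t2 =>
      rw [List.getLast?_cons_cons] at hl
      rcases List.mem_cons.mp ha with rfl | hat
      · have hlm : lst ∈ h2 :: t2 := List.mem_of_getLast? hl
        have := (List.pairwise_cons.mp hp).1 lst hlm
        omega
      · exact ih (List.pairwise_cons.mp hp).2 hat hl

-- invariant of B's adjacent-dedup scan over a nondecreasing list
theorem pvDedup_inv (s : List Int) : ∀ (acc : List Int),
    acc.Pairwise (· < ·) → s.Pairwise (· ≤ ·) → (∀ a ∈ acc, ∀ b ∈ s, a ≤ b) →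
    (s.foldl (fun res value => if res.getLast? = some value then res else res ++ [value]) acc).Pairwise (· < ·)
    ∧ (∀ x, x ∈ s.foldl (fun res value => if res.getLast? = some value then res else res ++ [value]) acc ↔ x ∈ acc ∨ x ∈ s) := by
  induction s with
  | nil => intro acc hacc _ _; exact ⟨hacc, fun x => by simp⟩
  | cons v t ih =>
    intro acc hacc hs hle
    simp only [List.foldl_cons]
    by_cases hlast : acc.getLast? = some v
    · rw [if_pos hlast]
      have hv : v ∈ acc := List.mem_of_getLast? hlast
      obtain ⟨hp, hm⟩ := ih acc hacc (List.pairwise_cons.mp hs).2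
        (fun a ha b hb => hle a ha b (List.mem_cons_of_mem _ hb))
      refine ⟨hp, fun x => ?_⟩
      rw [hm x]
      constructor
      · rintro (h | h)
        · exact Or.inl h
        · exact Or.inr (List.mem_cons_of_mem _ h)
      · rintro (h | h)
        · exact Or.inl h
        · rcases List.mem_cons.mp h with rfl | h
          · exact Or.inl hv
          · exact Or.inr h
    · rw [if_neg hlast]
      have hacc' : (acc ++ [v]).Pairwise (· < ·) := by
        rw [List.pairwise_append]
        refine ⟨hacc, List.pairwise_singleton _ _, ?_⟩
        intro a ha b hb
        rcases List.mem_singleton.mp hb with rfl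
        have hav : a ≤ b := hle a ha b List.mem_cons_self
        rcases hg : acc.getLast? with _ | lst
        · exact absurd ha (by simp [List.getLast?_eq_none_iff.mp hg])
        · have halst : a ≤ lst := pvLe_getLast_of_pairwise_lt acc a lst hacc ha hg
          have hlstmem : lst ∈ acc := List.mem_of_getLast? hg
          have hlstle : lst ≤ b := hle lst hlstmem b List.mem_cons_self
          have hne : lst ≠ b := fun he => hlast (he ▸ hg)
          omega
      have hle' : ∀ a ∈ acc ++ [v], ∀ b ∈ t, a ≤ b := by
        intro a ha b hb
        rcases List.mem_append.mp ha with h | h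
        · exact hle a h b (List.mem_cons_of_mem _ hb)
        · rcases List.mem_singleton.mp h with rfl
          exact (List.pairwise_cons.mp hs).1 b hb
      obtain ⟨hp, hm⟩ := ih (acc ++ [v]) hacc' (List.pairwise_cons.mp hs).2 hle'
      refine ⟨hp, fun x => ?_⟩
      rw [hm x]
      simp [List.mem_append, List.mem_cons]
      tauto

-- ===== VERDICT (by name: the statement is the Claim_ definition above) =====
theorem normalize_index_list_py_spec : Claim_equal_normalize_index_list_py := by
  unfold Claim_equal_normalize_index_list_py
  intro raw _
  unfold Spec_normalize_index_list_py normalize_index_list_py normalize_index_list_py_alt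
  simp only [pvFoldl_append, List.nil_append]
  have hA : (raw.foldl
      (fun (st : List Int × PySem.Set Int) value =>
        if st.2.contains value then st else (st.1 ++ [value], st.2.add value))
      ([], PySem.Set.empty)).1 = PySem.Set.ofList raw := by
    have := pvA_fold_eq raw PySem.Set.empty
    rw [PySem.Set.ofList_eq_foldl]
    exact congrArg Prod.fst this
  rw [hA]
  -- B's scan over the sorted list
  set s := PySem.List.sorted raw (fun x => x) false with hs
  have hsp : s.Pairwise (· ≤ ·) := PySem.List.sorted_pairwise (xs := raw) (key := fun x => x)
  obtain ⟨hp, hm⟩ := pvDedup_inv s [] List.Pairwise.nil hsp (by intro a ha; cases ha)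
  set D := s.foldl (fun res value => if res.getLast? = some value then res else res ++ [value]) [] with hD
  have hnodupD : D.Nodup := hp.imp (fun h => ne_of_lt h)
  have hperm : D.Perm (PySem.Set.ofList raw) := by
    rw [List.perm_ext_iff_of_nodup hnodupD (PySem.Set.nodup_ofList raw)]
    intro x
    simp [hm x, PySem.Set.mem_ofList, hs, PySem.List.mem_sorted]
  exact PySem.List.sorted_eq_of_perm_of_pairwise_lt _ _ _ hperm hp
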